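-- pv_equiv track=rewrite | github.com/ankitaph/BE-Practicals | Ass3_UnionIntersection.py | max_min_composition
-- ===== SOURCE A (Python) =====
-- import itertools
--
-- def max_min_composition(relation1, relation2):
--     composition = {}
--     for (x, z1), (z2, y) in itertools.product(relation1.keys(), relation2.keys()):
--         if z1 == z2:
--             if (x, y) in composition:
--                 composition[(x, y)] = max(
--                     composition[(x, y)], min(relation1[(x, z1)], relation2[(z2, y)])
--                 )
--             else:
--                 composition[(x, y)] = min(relation1[(x, z1)], relation2[(z2, y)])
--     return composition
-- ===== SOURCE B (Python) =====
-- def max_min_composition(relation1, relation2):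
--     # Hash-join on the middle variable: index relation2 by z once, then
--     # one pass over relation1 visiting only the matching bucket.
--     right = {}
--     for (z, y), v2 in relation2.items():
--         right.setdefault(z, []).append((y, v2))
--     composition = {}
--     for (x, z), v1 in relation1.items():
--         for y, v2 in right.get(z, ()):
--             w = min(v1, v2)
--             if (x, y) in composition:
--                 composition[(x, y)] = max(composition[(x, y)], w)
--             else:
--                 composition[(x, y)] = w
--     return composition
-- ===== Notes on version B (the rewrite author's own statement) =====
-- stated objective: faster
-- what changed: B replaces A's scan over the full cartesian product of key pairs (filtering on z1 == z2 and re-looking every value up in the dicts) by a hash join: it groups relation2 into buckets keyed by the middle variable z in one pass, then makes one pass over relation1's items visiting only the matching bucket, using the values carried by the items instead of dict lookups.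
import Mathlib
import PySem

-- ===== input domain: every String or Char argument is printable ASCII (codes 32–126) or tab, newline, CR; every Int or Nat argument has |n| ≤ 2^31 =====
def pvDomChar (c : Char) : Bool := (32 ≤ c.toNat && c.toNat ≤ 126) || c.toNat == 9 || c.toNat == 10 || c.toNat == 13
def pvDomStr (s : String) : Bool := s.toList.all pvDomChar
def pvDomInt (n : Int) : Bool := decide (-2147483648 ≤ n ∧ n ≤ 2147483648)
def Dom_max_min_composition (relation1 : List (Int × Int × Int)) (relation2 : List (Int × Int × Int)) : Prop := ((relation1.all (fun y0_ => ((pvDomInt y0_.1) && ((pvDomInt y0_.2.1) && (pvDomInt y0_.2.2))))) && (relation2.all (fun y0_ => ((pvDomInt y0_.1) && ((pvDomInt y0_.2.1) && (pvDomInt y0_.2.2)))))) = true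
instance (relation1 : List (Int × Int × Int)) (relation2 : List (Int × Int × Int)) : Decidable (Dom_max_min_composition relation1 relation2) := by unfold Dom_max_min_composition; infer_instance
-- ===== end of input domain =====

-- B builds a bucket index of relation2 keyed by the middle variable z and joins in one pass
-- over relation1, instead of A's filtered scan over the full product of key pairs: faster.

-- ===== PORT A =====
-- relation[(a, b)] : dict lookup, first match; the default 0 is unreachable in A because the
-- key is always drawn from the relation itself (Python would raise KeyError otherwise).
def pvLookup (r : List (Int × Int × Int)) (a : Int) (b : Int) : Int :=
  match r.find? (fun e => decide (e.1 = a ∧ e.2.1 = b)) with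
  | some e => e.2.2
  | none => 0

def max_min_composition (relation1 : List (Int × Int × Int)) (relation2 : List (Int × Int × Int)) : List (Int × Int × Int) :=
  -- itertools.product(relation1.keys(), relation2.keys()) = nested loops, relation1-major
  let comp : PySem.Dict (Int × Int) Int :=
    relation1.foldl (fun comp e1 =>
      relation2.foldl (fun comp e2 =>
        if e1.2.1 = e2.1 then
          match comp.get? (e1.1, e2.2.1) with
          | some old => comp.insert (e1.1, e2.2.1) (max old (min (pvLookup relation1 e1.1 e1.2.1) (pvLookup relation2 e2.1 e2.2.1)))
          | none => comp.insert (e1.1, e2.2.1) (min (pvLookup relation1 e1.1 e1.2.1) (pvLookup relation2 e2.1 e2.2.1))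
        else comp) comp) PySem.Dict.empty
  comp.items.map (fun kv => (kv.1.1, kv.1.2, kv.2))

-- ===== PORT B =====
-- right.setdefault(z, []).append((y, v2)) : append to the bucket, keeping the key's position
def pvRightIndex (relation2 : List (Int × Int × Int)) : PySem.Dict Int (List (Int × Int)) :=
  relation2.foldl (fun d e => d.insert e.1 (d.getD e.1 [] ++ [(e.2.1, e.2.2)])) PySem.Dict.empty

def max_min_composition_alt (relation1 : List (Int × Int × Int)) (relation2 : List (Int × Int × Int)) : List (Int × Int × Int) :=
  let right := pvRightIndex relation2
  let comp : PySem.Dict (Int × Int) Int :=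
    relation1.foldl (fun comp e1 =>
      (right.getD e1.2.1 []).foldl (fun comp yv =>
        let w := min e1.2.2 yv.2
        match comp.get? (e1.1, yv.1) with
        | some old => comp.insert (e1.1, yv.1) (max old w)
        | none => comp.insert (e1.1, yv.1) w) comp) PySem.Dict.empty
  comp.items.map (fun kv => (kv.1.1, kv.1.2, kv.2))

-- ===== PRECONDITION & SPEC =====
-- Pre_ requires each association list to carry pairwise-distinct keys (x, z), exactly as a
-- Python dict always does; it excludes no input the Python function can receive.
def Pre_max_min_composition (relation1 : List (Int × Int × Int)) (relation2 : List (Int × Int × Int)) : Prop :=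
  (relation1.map (fun e => (e.1, e.2.1))).Nodup ∧ (relation2.map (fun e => (e.1, e.2.1))).Nodup
instance (relation1 : List (Int × Int × Int)) (relation2 : List (Int × Int × Int)) : Decidable (Pre_max_min_composition relation1 relation2) := by unfold Pre_max_min_composition; infer_instance

def pvWitness_max_min_composition : (List (Int × Int × Int)) × (List (Int × Int × Int)) :=
  ([(1, 2, 3), (1, 4, 5)], [(2, 7, 1), (4, 7, 6)])

def Spec_max_min_composition (relation1 : List (Int × Int × Int)) (relation2 : List (Int × Int × Int)) (out : List (Int × Int × Int)) : Prop := out = max_min_composition_alt relation1 relation2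
instance (relation1 : List (Int × Int × Int)) (relation2 : List (Int × Int × Int)) (out : List (Int × Int × Int)) : Decidable (Spec_max_min_composition relation1 relation2 out) := by unfold Spec_max_min_composition; infer_instance

-- ===== CLAIM (what is proved, stated in full; the proofs are below) =====
def Claim_equal_max_min_composition : Prop := ∀ (relation1 : List (Int × Int × Int)) (relation2 : List (Int × Int × Int)), Dom_max_min_composition relation1 relation2 → Pre_max_min_composition relation1 relation2 → Spec_max_min_composition relation1 relation2 (max_min_composition relation1 relation2)

-- ===== LEMMAS AND PROOFS =====

theorem pvLookup_self (r : List (Int × Int × Int))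
    (hnodup : (r.map (fun e => (e.1, e.2.1))).Nodup) (e : Int × Int × Int) (he : e ∈ r) :
    pvLookup r e.1 e.2.1 = e.2.2 := by
  induction r with
  | nil => cases he
  | cons a r ih =>
    simp only [List.map_cons, List.nodup_cons] at hnodup
    rcases List.mem_cons.mp he with rfl | he'
    · simp [pvLookup]
    · have hne : ¬(a.1 = e.1 ∧ a.2.1 = e.2.1) := by
        intro ⟨hx, hz⟩
        exact hnodup.1 (by

          exact List.mem_map.mpr ⟨e, he', by simp [hx, hz]⟩)
      simpa [pvLookup, hne] using ih hnodup.2 he' 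

theorem pvRightIndex_getD (relation2 : List (Int × Int × Int)) (z : Int) :
    (pvRightIndex relation2).getD z [] =
      (relation2.filter (fun e => decide (e.1 = z))).map (fun e => (e.2.1, e.2.2)) := by
  suffices h : ∀ (l : List (Int × Int × Int)) (d : PySem.Dict Int (List (Int × Int))) (z : Int),
      (l.foldl (fun d e => d.insert e.1 (d.getD e.1 [] ++ [(e.2.1, e.2.2)])) d).getD z [] =
        d.getD z [] ++ (l.filter (fun e => decide (e.1 = z))).map (fun e => (e.2.1, e.2.2)) by
    simpa [pvRightIndex] using h relation2 PySem.Dict.empty z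
  intro l
  induction l with
  | nil => simp
  | cons e l ih =>
    intro d z
    simp only [List.foldl_cons, List.filter_cons, ih]
    by_cases hz : e.1 = z
    · subst hz
      simp
    · simp [PySem.Dict.getD_insert, hz, Ne.symm hz]


theorem inner_fold_eq (r2 : List (Int × Int × Int)) (x z v1 : Int)
    (comp : PySem.Dict (Int × Int) Int) :
    r2.foldl (fun comp e2 =>
        if z = e2.1 then
          match comp.get? (x, e2.2.1) with
          | some old => comp.insert (x, e2.2.1) (max old (min v1 e2.2.2))
          | none => comp.insert (x, e2.2.1) (min v1 e2.2.2)
        else comp) comp =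
      ((r2.filter (fun e => decide (e.1 = z))).map (fun e => (e.2.1, e.2.2))).foldl
        (fun comp yv =>
          match comp.get? (x, yv.1) with
          | some old => comp.insert (x, yv.1) (max old (min v1 yv.2))
          | none => comp.insert (x, yv.1) (min v1 yv.2)) comp := by
  induction r2 generalizing comp with
  | nil => rfl
  | cons e l ih =>
    simp only [List.foldl_cons, List.filter_cons]
    by_cases hz : e.1 = z
    · simp only [hz, decide_true, if_true, List.map_cons, List.foldl_cons]
      rw [ih]
    · have hz' : ¬(z = e.1) := fun h => hz h.symm
      simp only [hz, hz', decide_false, if_false]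
      rw [ih]
      simp

-- ===== VERDICT (by name: the statement is the Claim_ definition above) =====
theorem max_min_composition_spec : Claim_equal_max_min_composition := by
  intro r1 r2 _ hpre
  obtain ⟨h1, h2⟩ := hpre
  unfold Spec_max_min_composition max_min_composition max_min_composition_alt
  refine congrArg (fun d : PySem.Dict (Int × Int) Int => d.items.map (fun kv => (kv.1.1, kv.1.2, kv.2))) ?_
  apply PySem.List.foldl_congr_mem
  intro comp e1 he1
  rw [pvRightIndex_getD, ← inner_fold_eq]
  apply PySem.List.foldl_congr_mem
  intro c e2 he2
  rw [pvLookup_self r1 h1 e1 he1, pvLookup_self r2 h2 e2 he2]
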